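-- pv_equiv track=rewrite | github.com/kevinjalbert/dotfiles | exact_dot_agents/exact_skills/exact_plannotator-compound/exact_scripts/extract_exit_plan_mode_outcomes.py | extract_blockquote_feedback
-- ===== SOURCE A (Python) =====
-- from typing import Dict, Iterable, Iterator, List, Optional, Tuple
--
-- def extract_blockquote_feedback(text: str) -> List[str]:
--     quotes: List[str] = []
--     current: List[str] = []
--
--     for raw_line in text.splitlines():
--         stripped = raw_line.strip()
--         if stripped.startswith(">"):
--             current.append(stripped[1:].lstrip())
--             continue
--
--         if current:
--             if not stripped or stripped.startswith("## ") or stripped == "---":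
--                 quote = "\n".join(line for line in current if line).strip()
--                 if quote:
--                     quotes.append(quote)
--                 current = []
--                 continue
--
--             # Preserve wrapped continuation lines that belong to the same quote.
--             current.append(stripped)
--
--     if current:
--         quote = "\n".join(line for line in current if line).strip()
--         if quote:
--             quotes.append(quote)
--
--     return quotes
-- ===== SOURCE B (Python) =====
-- def extract_blockquote_feedback(text):
--     # Phase 1: split the lines into runs of non-terminator lines (already stripped).
--     groups = []
--     run = []
--     for raw in text.splitlines():
--         s = raw.strip()
--         if not s or s.startswith("## ") or s == "---":
--             if run:
--                 groups.append(run)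
--             run = []
--         else:
--             run.append(s)
--     if run:
--         groups.append(run)
--
--     # Phase 2: from each run, extract the quote starting at its first '>' line.
--     quotes = []
--     for g in groups:
--         rest = g
--         while rest and not rest[0].startswith(">"):
--             rest = rest[1:]
--         parts = [l[1:].lstrip() if l.startswith(">") else l for l in rest]
--         quote = "\n".join(p for p in parts if p).strip()
--         if quote:
--             quotes.append(quote)
--     return quotes
-- ===== Notes on version B (the rewrite author's own statement) =====
-- stated objective: alternative
-- what changed: Replaces A's inline state machine (quotes+current accumulated in one pass with flush-on-terminator) by a two-phase decomposition: first partition the stripped lines into runs separated by terminator lines, then extract from each run the quote starting at its first blockquote-marker line.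
import Mathlib
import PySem

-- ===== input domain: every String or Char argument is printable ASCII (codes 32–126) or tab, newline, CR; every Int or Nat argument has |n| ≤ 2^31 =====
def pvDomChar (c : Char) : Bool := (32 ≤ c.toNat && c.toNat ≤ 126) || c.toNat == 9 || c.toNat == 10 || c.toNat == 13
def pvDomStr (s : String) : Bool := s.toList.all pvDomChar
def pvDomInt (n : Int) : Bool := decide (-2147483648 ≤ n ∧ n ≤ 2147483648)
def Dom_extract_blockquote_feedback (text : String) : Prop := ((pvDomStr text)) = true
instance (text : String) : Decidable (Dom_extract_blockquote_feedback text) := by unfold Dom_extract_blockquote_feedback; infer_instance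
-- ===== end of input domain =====

-- B replaces A's inline state machine by a two-phase decomposition (partition the stripped
-- lines into terminator-separated runs, then extract the quote from each run); same cost.

-- ===== PORT A =====
-- flush of `current`: quote = "\n".join(line for line in current if line).strip(); append if truthy
def pvFlushA (quotes current : List String) : List String :=
  let quote := PySem.Str.strip (PySem.Str.join "\n" (current.filter (fun l => !(l == ""))))
  if quote == "" then quotes else quotes ++ [quote]

def pvStepA (st : List String × List String) (raw_line : String) : List String × List String :=
  let stripped := PySem.Str.strip raw_line
  if PySem.Str.startswith stripped ">" then
    (st.1, st.2 ++ [PySem.Str.lstrip (PySem.Str.slice stripped (some 1) none)])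
  else if st.2 ≠ [] then
    if stripped == "" || PySem.Str.startswith stripped "## " || stripped == "---" then
      (pvFlushA st.1 st.2, [])
    else
      (st.1, st.2 ++ [stripped])
  else st

def extract_blockquote_feedback (text : String) : List String :=
  let st := (PySem.Str.splitlines text).foldl pvStepA ([], [])
  if st.2 ≠ [] then pvFlushA st.1 st.2 else st.1

-- ===== PORT B =====
def pvIsTerm (s : String) : Bool :=
  s == "" || PySem.Str.startswith s "## " || s == "---"

-- phase 1: cut the stripped lines into runs at terminator lines
def pvStepG (st : List (List String) × List String) (raw : String) : List (List String) × List String :=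
  let s := PySem.Str.strip raw
  if pvIsTerm s then
    (if st.2 ≠ [] then st.1 ++ [st.2] else st.1, [])
  else (st.1, st.2 ++ [s])

-- `while rest and not rest[0].startswith(">"): rest = rest[1:]`
def pvDropToGt (rest : List String) : List String :=
  match rest with
  | [] => []
  | l :: t => if PySem.Str.startswith l ">" then l :: t else pvDropToGt t

def pvRender (l : String) : String :=
  if PySem.Str.startswith l ">" then PySem.Str.lstrip (PySem.Str.slice l (some 1) none) else l

-- phase 2: extract the quote of one run
def pvExtract (quotes : List String) (g : List String) : List String :=
  let quote := PySem.Str.strip (PySem.Str.join "\n" (((pvDropToGt g).map pvRender).filter (fun l => !(l == ""))))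
  if quote == "" then quotes else quotes ++ [quote]

def extract_blockquote_feedback_alt (text : String) : List String :=
  let st := (PySem.Str.splitlines text).foldl pvStepG ([], [])
  let groups := if st.2 ≠ [] then st.1 ++ [st.2] else st.1
  groups.foldl pvExtract []

-- ===== PRECONDITION & SPEC =====
def Spec_extract_blockquote_feedback (text : String) (out : List String) : Prop := out = extract_blockquote_feedback_alt text
instance (text : String) (out : List String) : Decidable (Spec_extract_blockquote_feedback text out) := by unfold Spec_extract_blockquote_feedback; infer_instance

-- ===== CLAIM (what is proved, stated in full; the proofs are below) =====
def Claim_equal_extract_blockquote_feedback : Prop := ∀ (text : String), Dom_extract_blockquote_feedback text → Spec_extract_blockquote_feedback text (extract_blockquote_feedback text)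

-- ===== LEMMAS AND PROOFS =====

-- the tail flush of port A, as a function of the fold state
def pvFinishA (st : List String × List String) : List String :=
  if st.2 ≠ [] then pvFlushA st.1 st.2 else st.1

-- a stripped line that begins with the blockquote marker is never a terminator
theorem pvGt_not_term (s : String) (h : PySem.Str.startswith s ">" = true) : pvIsTerm s = false := by
  simp only [PySem.Str.startswith_eq, PySem.Chars.startswith_iff] at h
  obtain ⟨t, ht⟩ := h
  have hsl : s.toList = '>' :: t := by simpa using ht.symm
  have h1 : (s == "") = false := by
    simp only [beq_eq_false_iff_ne, ne_eq]
    intro he; rw [he] at hsl; simp at hsl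
  have h2 : PySem.Chars.startswith s.toList ['#', '#', ' '] = false := by
    rw [show s.toList = '>' :: t from hsl]
    by_contra hb
    have : PySem.Chars.startswith ('>' :: t) "## ".toList = true := by
      simpa using hb
    rw [PySem.Chars.startswith_iff] at this
    obtain ⟨u, hu⟩ := this
    simp at hu
  have h3 : (s == "---") = false := by
    simp only [beq_eq_false_iff_ne, ne_eq]
    intro he; rw [he] at hsl; simp at hsl
  simp [pvIsTerm, h1, h2, h3]

theorem pvDropToGt_append_gt (run : List String) (x : String)
    (hx : PySem.Str.startswith x ">" = true) :
    pvDropToGt (run ++ [x]) = pvDropToGt run ++ [x] := by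
  simp only [PySem.Str.startswith_eq] at hx
  induction run with
  | nil => simp [pvDropToGt]; simpa using hx
  | cons h t ih =>
    by_cases hh : PySem.Chars.startswith h.toList ['>'] = true
    · simp [pvDropToGt, hh]
    · simp [pvDropToGt, hh, ih]

theorem pvDropToGt_append_nongt (run : List String) (x : String)
    (hx : ¬ PySem.Str.startswith x ">" = true) :
    pvDropToGt (run ++ [x]) =
      if pvDropToGt run = [] then [] else pvDropToGt run ++ [x] := by
  simp only [PySem.Str.startswith_eq] at hx
  induction run with
  | nil => simp [pvDropToGt]; simpa using hx
  | cons h t ih =>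
    by_cases hh : PySem.Chars.startswith h.toList ['>'] = true
    · simp [pvDropToGt, hh]
    · simp [pvDropToGt, hh, ih]

theorem pvRender_gt (s : String) (h : PySem.Str.startswith s ">" = true) :
    pvRender s = PySem.Str.lstrip (PySem.Str.slice s (some 1) none) := by
  have h' : PySem.Chars.startswith s.toList ['>'] = true := by simpa using h
  simp [pvRender, h']

theorem pvRender_nongt (s : String) (h : ¬ PySem.Str.startswith s ">" = true) :
    pvRender s = s := by
  have h' : PySem.Chars.startswith s.toList ['>'] = false := by simpa using h
  simp [pvRender, h']

theorem pvFlushA_nil (qs : List String) : pvFlushA qs [] = qs := by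
  have : PySem.Str.strip (PySem.Str.join "\n" ([] : List String)) = "" := by decide
  simp [pvFlushA, this]

theorem pvExtract_eq (qs g : List String) :
    pvExtract qs g = pvFlushA qs ((pvDropToGt g).map pvRender) := rfl

-- groups only accumulate in phase 1
theorem pvStepG_accum (lines : List String) (gs0 gs1 : List (List String)) (r : List String) :
    lines.foldl pvStepG (gs0 ++ gs1, r) =
      (gs0 ++ (lines.foldl pvStepG (gs1, r)).1, (lines.foldl pvStepG (gs1, r)).2) := by
  induction lines generalizing gs1 r with
  | nil => simp
  | cons l rest ih =>
    simp only [List.foldl_cons]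
    by_cases ht : pvIsTerm (PySem.Str.strip l) = true
    · by_cases hr : r ≠ []
      · have := ih (gs1 ++ [r]) []
        simpa [pvStepG, ht, hr, List.append_assoc] using this
      · simpa [pvStepG, ht, hr] using ih gs1 []
    · simpa [pvStepG, ht] using ih gs1 (r ++ [PySem.Str.strip l])

-- main invariant: A's fold+flush from (qs, rendered tail of run) equals B's phase 2 over
-- the groups phase 1 produces from run
set_option maxHeartbeats 2000000 in
theorem pvMain (lines : List String) (qs run : List String) :
    pvFinishA (lines.foldl pvStepA (qs, (pvDropToGt run).map pvRender)) =
      (let st := lines.foldl pvStepG (([] : List (List String)), run)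
       (if st.2 ≠ [] then st.1 ++ [st.2] else st.1).foldl pvExtract qs) := by
  induction lines generalizing qs run with
  | nil =>
    by_cases hr : run = []
    · simp [pvFinishA, hr, pvDropToGt]
    · simp only [List.foldl_nil, if_pos (by simpa using hr)]
      by_cases hR : (pvDropToGt run).map pvRender = []
      · simp [pvFinishA, hR, pvExtract_eq, pvFlushA_nil]
      · simp [pvFinishA, hR, pvExtract_eq]
  | cons l rest ih =>
    simp only [List.foldl_cons]
    set s := PySem.Str.strip l with hs
    by_cases hgt : PySem.Str.startswith s ">" = true
    · -- blockquote-marker line: appended on both sides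
      have hterm := pvGt_not_term s hgt
      have hgt' : PySem.Chars.startswith s.toList ['>'] = true := by simpa using hgt
      have hA : pvStepA (qs, (pvDropToGt run).map pvRender) l =
          (qs, (pvDropToGt (run ++ [s])).map pvRender) := by
        rw [pvDropToGt_append_gt run s hgt]
        simp [pvStepA, ← hs, hgt', pvRender_gt s hgt]
      have hB : pvStepG (([] : List (List String)), run) l = ([], run ++ [s]) := by
        simp [pvStepG, ← hs, hterm]
      rw [hA, hB]
      exact ih qs (run ++ [s])
    · by_cases hterm : pvIsTerm s = true
      · -- terminator: A flushes, B closes the group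
        have hB : pvStepG (([] : List (List String)), run) l =
            ((if run ≠ [] then [run] else []), []) := by
          simp [pvStepG, ← hs, hterm]
        rw [hB]
        have hacc := pvStepG_accum rest (if run ≠ [] then [run] else []) [] []
        simp only [List.append_nil] at hacc
        rw [hacc]
        set st' := rest.foldl pvStepG (([] : List (List String)), []) with hst'
        -- A's step
        have hgt0 : PySem.Chars.startswith s.toList ['>'] = false := by simpa using hgt
        have hcond : (s = "" ∨ PySem.Chars.startswith s.toList ['#', '#', ' '] = true) ∨ s = "---" := by
          simp only [pvIsTerm, Bool.or_eq_true, beq_iff_eq, PySem.Str.startswith_eq] at hterm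
          simpa only [show ("## ".toList : List Char) = ['#', '#', ' '] from rfl] using hterm
        by_cases hR : (pvDropToGt run).map pvRender = []
        · have hA : pvStepA (qs, (pvDropToGt run).map pvRender) l =
              (qs, (pvDropToGt ([] : List String)).map pvRender) := by
            simp [pvStepA, ← hs, hgt0, hR, pvDropToGt]
          rw [hA]
          have := ih qs ([] : List String)
          simp only [← hst'] at this
          rw [this]
          by_cases hr : run = []
          · simp [hr]
          · -- closed group run extracts nothing since no '>' line
            have : pvExtract qs run = qs := by
              rw [pvExtract_eq, hR, pvFlushA_nil]
            simp only [if_pos (by simpa using hr)]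
            by_cases h2 : st'.2 ≠ []
            · simp [h2, List.foldl_append, this]
            · simp [h2, this]
        · have hrun : run ≠ [] := by
            intro h; rw [h] at hR; simp [pvDropToGt] at hR
          have hA : pvStepA (qs, (pvDropToGt run).map pvRender) l =
              (pvFlushA qs ((pvDropToGt run).map pvRender),
               (pvDropToGt ([] : List String)).map pvRender) := by
            simp [pvStepA, ← hs, hgt0, hR, hcond, pvDropToGt]
          rw [hA]
          have := ih (pvFlushA qs ((pvDropToGt run).map pvRender)) ([] : List String)
          simp only [← hst'] at this
          rw [this]
          have hx : pvExtract qs run = pvFlushA qs ((pvDropToGt run).map pvRender) :=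
            pvExtract_eq qs run
          simp only [if_pos (by simpa using hrun)]
          by_cases h2 : st'.2 ≠ []
          · simp [h2, List.foldl_append, hx]
          · simp [h2, hx]
      · -- ordinary continuation line
        have hgt0 : PySem.Chars.startswith s.toList ['>'] = false := by simpa using hgt
        have hcondn : ¬ ((s = "" ∨ PySem.Chars.startswith s.toList ['#', '#', ' '] = true) ∨ s = "---") := by
          simp only [pvIsTerm, Bool.or_eq_true, beq_iff_eq, PySem.Str.startswith_eq] at hterm
          simpa only [show ("## ".toList : List Char) = ['#', '#', ' '] from rfl] using hterm
        have hB : pvStepG (([] : List (List String)), run) l = ([], run ++ [s]) := by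
          simp [pvStepG, ← hs, hterm]
        rw [hB]
        have hdrop := pvDropToGt_append_nongt run s hgt
        by_cases hR : (pvDropToGt run).map pvRender = []
        · have hnil : pvDropToGt run = [] := by simpa using hR
          have hA : pvStepA (qs, (pvDropToGt run).map pvRender) l =
              (qs, (pvDropToGt (run ++ [s])).map pvRender) := by
            rw [hdrop]
            simp [pvStepA, ← hs, hgt0, hnil]
          rw [hA]; exact ih qs (run ++ [s])
        · have hnil : ¬ pvDropToGt run = [] := by
            intro h; rw [h] at hR; simp at hR
          have hA : pvStepA (qs, (pvDropToGt run).map pvRender) l =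
              (qs, (pvDropToGt (run ++ [s])).map pvRender) := by
            rw [hdrop]
            simp [pvStepA, ← hs, hgt0, hR, hnil, hcondn, pvRender_nongt s hgt]
          rw [hA]; exact ih qs (run ++ [s])

-- ===== VERDICT (by name: the statement is the Claim_ definition above) =====
theorem extract_blockquote_feedback_spec : Claim_equal_extract_blockquote_feedback := by
  intro text _
  unfold Spec_extract_blockquote_feedback extract_blockquote_feedback extract_blockquote_feedback_alt
  have := pvMain (PySem.Str.splitlines text) [] []
  simpa [pvFinishA, pvDropToGt] using this
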